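-- pv_equiv track=rewrite | github.com/gkmgrm/Projects | pathFindingAI/libskmapsV2.py | filterRawMap
-- ===== SOURCE A (Python) =====
-- def filterRawMap(rawMap):
--     goalFound = False
--     for l in range(len(rawMap)):
--         for c in range(len(rawMap[l])):
--             if rawMap[l][c] == "#":   # wall
--                 continue
--             elif rawMap[l][c] == " ":   # empty space
--                 continue
--             elif rawMap[l][c] == "@":   # player
--                 continue
--             elif rawMap[l][c] == "." and not goalFound : # goal position
--                 goalFound = True
--                 continue
--             else:           # everything else is assumed to be an empty space
--                 rawMap[l][c] = " "
--     return rawMap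
-- ===== SOURCE B (Python) =====
-- def filterRawMap(rawMap):
--     # pass 1 (read-only): locate the first '.' in scan order
--     goal = None
--     for l, row in enumerate(rawMap):
--         for c, ch in enumerate(row):
--             if ch == ".":
--                 goal = (l, c)
--                 break
--         if goal is not None:
--             break
--     # pass 2: rewrite every cell by a pure per-cell rule
--     for l, row in enumerate(rawMap):
--         for c, ch in enumerate(row):
--             if ch in ("#", " ", "@"):
--                 continue
--             if ch == "." and goal == (l, c):
--                 continue
--             rawMap[l][c] = " "
--     return rawMap
-- ===== Notes on version B (the rewrite author's own statement) =====
-- stated objective: alternative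
-- what changed: A's single stateful scan threading a goalFound boolean is replaced by two passes: a read-only scan that records the coordinate of the first '.', then a stateless rewrite of every cell comparing against that recorded coordinate.
import Mathlib
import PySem

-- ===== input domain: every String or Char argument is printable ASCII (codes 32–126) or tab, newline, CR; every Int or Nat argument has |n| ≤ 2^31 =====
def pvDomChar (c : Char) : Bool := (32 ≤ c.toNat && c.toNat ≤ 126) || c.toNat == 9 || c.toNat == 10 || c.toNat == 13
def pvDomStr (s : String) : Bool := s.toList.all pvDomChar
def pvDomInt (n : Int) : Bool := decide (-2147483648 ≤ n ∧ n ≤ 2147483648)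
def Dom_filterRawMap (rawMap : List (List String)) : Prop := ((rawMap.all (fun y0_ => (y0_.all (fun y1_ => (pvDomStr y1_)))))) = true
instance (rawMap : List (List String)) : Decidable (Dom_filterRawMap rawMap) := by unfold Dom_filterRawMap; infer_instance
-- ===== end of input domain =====

-- B replaces A's stateful goalFound-threading scan by two passes (find first '.' coordinate,
-- then a stateless per-cell rewrite); alternative decomposition, same cost, return value only
-- (both Pythons mutate rawMap in place the same way).

-- ===== PORT A =====
-- inner loop over one row, threading the goalFound flag
def pvRowA : List String → Bool → List String × Bool
  | [], g => ([], g)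
  | s :: rest, g =>
    if s == "#" then
      let (r, g') := pvRowA rest g; (s :: r, g')
    else if s == " " then
      let (r, g') := pvRowA rest g; (s :: r, g')
    else if s == "@" then
      let (r, g') := pvRowA rest g; (s :: r, g')
    else if s == "." && !g then
      let (r, g') := pvRowA rest true; (s :: r, g')
    else
      let (r, g') := pvRowA rest g; (" " :: r, g')

-- outer loop over the rows, threading the goalFound flag
def pvMapA : List (List String) → Bool → List (List String)
  | [], _ => []
  | row :: rest, g =>
    let (r, g') := pvRowA row g
    r :: pvMapA rest g'

def filterRawMap (rawMap : List (List String)) : List (List String) :=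
  pvMapA rawMap false

-- ===== PORT B =====
-- first pass, inner loop: index of the first "." in a row (break on hit)
def pvFindDotRow : List String → Nat → Option Nat
  | [], _ => none
  | s :: rest, c => if s == "." then some c else pvFindDotRow rest (c + 1)

-- first pass, outer loop: coordinate of the first "." in the map (break once found)
def pvFindGoal : List (List String) → Nat → Option (Nat × Nat)
  | [], _ => none
  | row :: rest, l =>
    match pvFindDotRow row 0 with
    | some c => some (l, c)
    | none => pvFindGoal rest (l + 1)

-- second pass, inner loop: stateless per-cell rewrite
def pvRowB (goal : Option (Nat × Nat)) (l : Nat) : Nat → List String → List String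
  | _, [] => []
  | c, s :: rest =>
    (if s == "#" || s == " " || s == "@" then s
     else if s == "." && goal == some (l, c) then s
     else " ") :: pvRowB goal l (c + 1) rest

-- second pass, outer loop
def pvPassB (goal : Option (Nat × Nat)) : Nat → List (List String) → List (List String)
  | _, [] => []
  | l, row :: rest => pvRowB goal l 0 row :: pvPassB goal (l + 1) rest

def filterRawMap_alt (rawMap : List (List String)) : List (List String) :=
  pvPassB (pvFindGoal rawMap 0) 0 rawMap

-- ===== PRECONDITION & SPEC =====
def Spec_filterRawMap (rawMap : List (List String)) (out : List (List String)) : Prop := out = filterRawMap_alt rawMap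
instance (rawMap : List (List String)) (out : List (List String)) : Decidable (Spec_filterRawMap rawMap out) := by unfold Spec_filterRawMap; infer_instance

-- ===== CLAIM (what is proved, stated in full; the proofs are below) =====
def Claim_equal_filterRawMap : Prop := ∀ (rawMap : List (List String)), Dom_filterRawMap rawMap → Spec_filterRawMap rawMap (filterRawMap rawMap)

-- ===== LEMMAS AND PROOFS =====

-- the pure per-cell rewrite once the goal has been passed / cannot match
def pvF (s : String) : String := if s == "#" || s == " " || s == "@" then s else " "

-- A's row loop with the flag already set just maps pvF
theorem pvRowA_true (row : List String) : pvRowA row true = (row.map pvF, true) := by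
  induction row with
  | nil => rfl
  | cons s rest ih =>
    simp only [pvRowA, ih, List.map, pvF, Bool.not_true, Bool.and_false]
    split_ifs <;> simp_all

-- B's row loop with a goal that cannot point at an index ≥ c of this row maps pvF
theorem pvRowB_nomatch (goal : Option (Nat × Nat)) (l : Nat) (row : List String) (c : Nat)
    (h : ∀ c', c ≤ c' → goal ≠ some (l, c')) :
    pvRowB goal l c row = row.map pvF := by
  induction row generalizing c with
  | nil => rfl
  | cons s rest ih =>
    have h0 : goal ≠ some (l, c) := h c le_rfl
    have hb : (goal == some (l, c)) = false := by
      simpa [beq_eq_false_iff_ne] using h0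
    simp only [pvRowB, hb, Bool.and_false, List.map, pvF]
    have := ih (c + 1) (fun c' hc' => h c' (by omega))
    split_ifs <;> simp_all

-- a row without any "." is mapped by pvF by A's loop, flag unchanged
theorem pvRowA_nodot (row : List String) (g : Bool) (c : Nat)
    (h : pvFindDotRow row c = none) : pvRowA row g = (row.map pvF, g) := by
  induction row generalizing c with
  | nil => rfl
  | cons s rest ih =>
    simp only [pvFindDotRow] at h
    by_cases hs : (s == ".") = true
    · rw [if_pos hs] at h; exact absurd h (by simp)
    · rw [if_neg hs] at h
      simp only [pvRowA, ih (c + 1) h, List.map, pvF, hs, Bool.false_and]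
      split_ifs <;> simp_all

-- findDotRow only returns indices ≥ its start index
theorem pvFindDotRow_ge (row : List String) (c c0 : Nat)
    (h : pvFindDotRow row c = some c0) : c ≤ c0 := by
  induction row generalizing c with
  | nil => simp [pvFindDotRow] at h
  | cons s rest ih =>
    simp only [pvFindDotRow] at h
    split_ifs at h with hs
    · simp only [Option.some.injEq] at h; omega
    · have := ih (c + 1) h; omega

-- the row holding the first ".": B's rewrite with goal (l, c0) equals A's loop from flag false
theorem pvRow_match (row : List String) (l c c0 : Nat)
    (h : pvFindDotRow row c = some c0) :
    pvRowB (some (l, c0)) l c row = (pvRowA row false).1 ∧ (pvRowA row false).2 = true := by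
  induction row generalizing c with
  | nil => simp [pvFindDotRow] at h
  | cons s rest ih =>
    simp only [pvFindDotRow] at h
    by_cases hs : (s == ".") = true
    · rw [if_pos hs] at h
      obtain rfl : c0 = c := by simpa using h.symm
      have hs' : s = "." := by simpa using hs
      subst hs'
      have htail : pvRowB (some (l, c0)) l (c0 + 1) rest = rest.map pvF :=
        pvRowB_nomatch _ _ _ _ (fun c' hc' => by simp; omega)
      simp [pvRowB, pvRowA, htail, pvRowA_true]
    · rw [if_neg hs] at h
      have hc0 : c + 1 ≤ c0 := pvFindDotRow_ge rest (c + 1) c0 h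
      have hb : (some (l, c0) == some (l, c)) = false := by
        simp; omega
      obtain ⟨ih1, ih2⟩ := ih (c + 1) h
      by_cases hk : (s == "#" || s == " " || s == "@") = true
      · rcases Bool.or_eq_true_iff.1 hk with hk' | hk'
        · rcases Bool.or_eq_true_iff.1 hk' with h1 | h1 <;>
            simp_all [pvRowB, pvRowA]
        · simp_all [pvRowB, pvRowA]
      · have hk' := Bool.not_eq_true _ |>.mp hk
        constructor <;>
          simp_all [pvRowB, pvRowA]
-- (long case analysis; each branch reduces both loops one step and applies the IH)

-- rows strictly after the goal row: B rewrites with pvF, A runs with flag true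
theorem pvPassB_after (rest : List (List String)) (l : Nat) (goal : Option (Nat × Nat))
    (h : ∀ l' c', l ≤ l' → goal ≠ some (l', c')) :
    pvPassB goal l rest = pvMapA rest true := by
  induction rest generalizing l with
  | nil => rfl
  | cons row rest ih =>
    simp only [pvPassB, pvMapA, pvRowA_true,
      pvRowB_nomatch goal l row 0 (fun c' _ => h l c' le_rfl)]
    exact congrArg _ (ih (l + 1) (fun l' c' hl => h l' c' (by omega)))

-- findGoal only returns rows ≥ its start index
theorem pvFindGoal_ge (rows : List (List String)) (l l0 c0 : Nat)
    (h : pvFindGoal rows l = some (l0, c0)) : l ≤ l0 := by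
  induction rows generalizing l with
  | nil => simp [pvFindGoal] at h
  | cons row rest ih =>
    simp only [pvFindGoal] at h
    cases hr : pvFindDotRow row 0 with
    | some c => simp [hr] at h; omega
    | none => rw [hr] at h; have := ih (l + 1) h; omega

-- main invariant: A's stateful scan from flag false equals B's two passes
theorem pvMain (rows : List (List String)) (l : Nat) :
    pvMapA rows false = pvPassB (pvFindGoal rows l) l rows := by
  induction rows generalizing l with
  | nil => rfl
  | cons row rest ih =>
    cases hr : pvFindDotRow row 0 with
    | none =>
      have hrowA := pvRowA_nodot row false 0 hr
      have hrowB : pvRowB (pvFindGoal rest (l + 1)) l 0 row = row.map pvF := by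
        apply pvRowB_nomatch
        intro c' _ hgoal
        exact absurd (pvFindGoal_ge rest (l + 1) l c' hgoal) (by omega)
      simp only [pvMapA, pvPassB, pvFindGoal, hr, hrowA, hrowB]
      exact congrArg _ (ih (l + 1))
    | some c =>
      obtain ⟨h1, h2⟩ := pvRow_match row l 0 c hr
      simp only [pvMapA, pvPassB, pvFindGoal, hr, h1]
      rw [show (pvRowA row false).2 = true from h2]
      refine congrArg _ ?_
      exact (pvPassB_after rest (l + 1) (some (l, c))
        (fun l' c' hl => by simp; omega)).symm

-- ===== VERDICT (by name: the statement is the Claim_ definition above) =====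
theorem filterRawMap_spec : Claim_equal_filterRawMap := by
  intro rawMap _
  unfold Spec_filterRawMap filterRawMap filterRawMap_alt
  exact pvMain rawMap 0
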